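-- pv_equiv track=rewrite | github.com/Plunnnnn/42-Cursus | push_swap/push_swap2.py | trier_pile
-- ===== SOURCE A (Python) =====
-- def trier_pile(pile_origine):
--     # Initialisation de la pile auxiliaire
--     pile_auxiliaire = []
--     nombre_instructions = 0  # Compteur d'instructions
--
--     # Déplacer les éléments de pile_origine vers pile_auxiliaire en les triant
--     while pile_origine:
--         # Extraire l'élément du sommet de pile_origine
--         temp = pile_origine.pop()
--         nombre_instructions += 1  # Pour le pop
--
--         # Déplacer les éléments plus grands de pile_auxiliaire vers pile_origine
--         while pile_auxiliaire and pile_auxiliaire[-1] > temp: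
--             pile_origine.append(pile_auxiliaire.pop())
--             nombre_instructions += 2  # Une comparaison et un pop-push
--
--         # Placer temp dans pile_auxiliaire
--         pile_auxiliaire.append(temp)
--         nombre_instructions += 1  # Pour le push
--
--     # Replacer les éléments de pile_auxiliaire vers pile_origine
--     while pile_auxiliaire:
--         pile_origine.append(pile_auxiliaire.pop())
--         nombre_instructions += 1  # Pour chaque pop-push final
--
--     return pile_origine, nombre_instructions
-- ===== SOURCE B (Python) =====
-- def trier_pile(pile_origine):
--     # Closed form: result is the pile sorted in descending order, and the
--     # instruction count is 3*n + 4*(number of pairs i<j with p[i] < p[j]).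
--     # Mutates pile_origine in place like A does (same final contents).
--     asc = 0
--     reste = pile_origine[:]
--     while reste:
--         x = reste.pop(0)
--         for y in reste:
--             if x < y:
--                 asc += 1
--     n = len(pile_origine)
--     pile_origine[:] = sorted(pile_origine, reverse=True)
--     return pile_origine, 3 * n + 4 * asc
-- ===== Notes on version B (the rewrite author's own statement) =====
-- stated objective: simpler
-- what changed: B replaces A's two-stack simulation (repeated pop/push transfers between piles) by a closed form: library sort descending for the pile plus a direct pair count (count = 3n + 4*#ascending pairs) instead of counting operations while simulating.
import Mathlib
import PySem

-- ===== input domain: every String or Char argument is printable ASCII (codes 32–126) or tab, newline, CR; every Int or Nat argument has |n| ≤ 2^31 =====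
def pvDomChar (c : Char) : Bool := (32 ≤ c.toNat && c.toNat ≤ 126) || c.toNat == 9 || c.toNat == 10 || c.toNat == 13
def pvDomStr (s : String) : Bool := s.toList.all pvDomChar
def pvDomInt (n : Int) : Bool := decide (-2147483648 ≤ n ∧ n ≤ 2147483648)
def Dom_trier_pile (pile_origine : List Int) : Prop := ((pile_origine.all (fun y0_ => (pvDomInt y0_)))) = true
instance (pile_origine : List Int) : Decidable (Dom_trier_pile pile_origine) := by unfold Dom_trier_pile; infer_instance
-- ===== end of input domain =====

-- B replaces A's two-stack simulation by a closed form (library sort descending +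
-- direct pair count); both A and B mutate the argument list in Python — the
-- equivalence proved here is about the RETURN value.

-- ===== PORT A =====
-- Stacks are represented top-first (Python's list keeps its top at the END, so the
-- pile is reversed on entry and the result reversed back on return; push = cons,
-- pop = head — the same pops, pushes and comparisons in the same order).

-- inner while: "while pile_auxiliaire and pile_auxiliaire[-1] > temp: origine.append(aux.pop()); c += 2"
def innerA (o a : List Int) (temp : Int) (c : Int) : List Int × List Int × Int :=
  match a with
  | [] => (o, [], c)
  | x :: rest => if temp < x then innerA (x :: o) rest temp (c + 2) else (o, x :: rest, c)

-- outer while: "while pile_origine: temp = origine.pop(); c += 1; <inner>; aux.append(temp); c += 1"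
-- (fuel-guarded; the proofs show (|pile|+1)² steps always suffice)
def outerA (fuel : Nat) (o a : List Int) (c : Int) : List Int × List Int × Int :=
  match fuel with
  | 0 => (o, a, c)
  | fuel + 1 =>
    match o with
    | [] => ([], a, c)
    | temp :: o1 =>
      let r := innerA o1 a temp (c + 1)
      outerA fuel r.1 (temp :: r.2.1) (r.2.2 + 1)

-- final while: "while pile_auxiliaire: origine.append(aux.pop()); c += 1"
def finalA (o a : List Int) (c : Int) : List Int × Int :=
  match a with
  | [] => (o, c)
  | x :: rest => finalA (x :: o) rest (c + 1)

def trier_pile (pile_origine : List Int) : List Int × Int :=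
  let r := outerA ((pile_origine.length + 1) * (pile_origine.length + 1)) pile_origine.reverse [] 0
  let f := finalA r.1 r.2.1 r.2.2
  (f.1.reverse, f.2)

-- ===== PORT B =====
-- "while reste: x = reste.pop(0); for y in reste: if x < y: asc += 1"
def ascLoopB (reste : List Int) (asc : Int) : Int :=
  match reste with
  | [] => asc
  | x :: rest => ascLoopB rest (rest.foldl (fun s y => if x < y then s + 1 else s) asc)

def trier_pile_alt (pile_origine : List Int) : List Int × Int :=
  let asc := ascLoopB pile_origine 0
  let n : Int := pile_origine.length
  (PySem.List.sorted pile_origine (fun x => x) true, 3 * n + 4 * asc)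

-- ===== PRECONDITION & SPEC =====
def Spec_trier_pile (pile_origine : List Int) (out : List Int × Int) : Prop := out = trier_pile_alt pile_origine
instance (pile_origine : List Int) (out : List Int × Int) : Decidable (Spec_trier_pile pile_origine out) := by unfold Spec_trier_pile; infer_instance

-- ===== CLAIM (what is proved, stated in full; the proofs are below) =====
def Claim_equal_trier_pile : Prop := ∀ (pile_origine : List Int), Dom_trier_pile pile_origine → Spec_trier_pile pile_origine (trier_pile pile_origine)

-- ===== LEMMAS AND PROOFS =====

-- inversions of a list (pairs earlier > later)
def invN : List Int → Nat
  | [] => 0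
  | x :: xs => xs.countP (fun y => decide (y < x)) + invN xs

-- ascending pairs (earlier < later)
def ascN : List Int → Nat
  | [] => 0
  | x :: xs => xs.countP (fun y => decide (x < y)) + ascN xs

-- #pairs (x ∈ o, y ∈ a) with x < y
def crossN (o a : List Int) : Nat := (o.map (fun x => a.countP (fun y => decide (x < y)))).sum

-- #pairs (x ∈ o, y ∈ a) with y < x
def crossLt (o a : List Int) : Nat := (o.map (fun x => a.countP (fun y => decide (y < x)))).sum

-- remaining transfer count from state (o, a)
def TN (o a : List Int) : Nat := invN o + crossN o a

lemma crossN_nil_right (o : List Int) : crossN o [] = 0 := by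
  simp [crossN]

lemma crossN_cons_right (y : Int) (w : List Int) : ∀ (o : List Int),
    crossN o (y :: w) = o.countP (fun x => decide (x < y)) + crossN o w := by
  intro o
  induction o with
  | nil => simp [crossN]
  | cons x o' ih =>
    simp only [crossN, List.map_cons, List.sum_cons, List.countP_cons] at ih ⊢
    split_ifs <;> omega

lemma crossN_swap (u v : List Int) : crossLt u v = crossN v u := by
  induction u with
  | nil => simp [crossLt, crossN]
  | cons x u' ih =>
    rw [crossN_cons_right]
    simp only [crossLt, List.map_cons, List.sum_cons] at ih ⊢
    omega

lemma crossN_append_left (u v a : List Int) : crossN (u ++ v) a = crossN u a + crossN v a := by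
  simp [crossN]

lemma crossN_append_right (o u v : List Int) : crossN o (u ++ v) = crossN o u + crossN o v := by
  induction u with
  | nil => simp [crossN]
  | cons y u' ih => rw [List.cons_append, crossN_cons_right, crossN_cons_right, ih]; omega

lemma crossN_eq_zero (u w : List Int) (h : ∀ x ∈ u, ∀ y ∈ w, ¬ x < y) : crossN u w = 0 := by
  induction u with
  | nil => simp [crossN]
  | cons x u' ih =>
    simp only [crossN, List.map_cons, List.sum_cons]
    have h1 : w.countP (fun y => decide (x < y)) = 0 := by
      rw [List.countP_eq_zero]
      intro y hy; simpa using h x (by simp) y hy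
    have h2 := ih (fun x hx y hy => h x (by simp [hx]) y hy)
    simp only [crossN] at h2
    omega

lemma invN_append (u v : List Int) : invN (u ++ v) = invN u + invN v + crossLt u v := by
  induction u with
  | nil => simp [invN, crossLt]
  | cons x u' ih =>
    simp only [List.cons_append, invN, List.countP_append, crossLt, List.map_cons, List.sum_cons]
    simp only [crossLt] at ih
    omega

lemma invN_of_pairwise_le (l : List Int) (h : l.Pairwise (fun x y => x ≤ y)) : invN l = 0 := by
  induction l with
  | nil => simp [invN]
  | cons x xs ih =>
    simp only [invN]
    rcases List.pairwise_cons.1 h with ⟨hx, hxs⟩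
    have h1 : xs.countP (fun y => decide (y < x)) = 0 := by
      rw [List.countP_eq_zero]; intro y hy; simpa using not_lt.2 (hx y hy)
    have h2 := ih hxs
    omega

lemma countP_reverse (l : List Int) (p : Int → Bool) : l.reverse.countP p = l.countP p := by
  simp

lemma crossLt_reverse (u v : List Int) : crossLt u.reverse v = crossLt u v := by
  simp [crossLt, List.map_reverse]

lemma sum_countP_singleton (x : Int) (l : List Int) :
    (l.map (fun z => List.countP (fun y => decide (y < z)) [x])).sum
      = l.countP (fun z => decide (x < z)) := by
  induction l with
  | nil => simp
  | cons b bs ih =>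
    simp only [List.map_cons, List.sum_cons, List.countP_cons, List.countP_nil]
    split_ifs <;> simp_all <;> omega

lemma invN_reverse_eq_ascN (l : List Int) : invN l.reverse = ascN l := by
  induction l with
  | nil => simp [invN, ascN]
  | cons x xs ih =>
    have hrev : (x :: xs).reverse = xs.reverse ++ [x] := by simp
    rw [hrev, invN_append, ih]
    simp only [ascN, crossLt, sum_countP_singleton, countP_reverse]
    simp [invN]
    omega

lemma invN_le_sq (l : List Int) : invN l ≤ l.length * l.length := by
  induction l with
  | nil => simp [invN]
  | cons x xs ih =>
    simp only [invN, List.length_cons]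
    have := List.countP_le_length (p := fun y => decide (y < x)) (l := xs)
    nlinarith

-- inner loop characterization (no hypotheses needed)
lemma innerA_char (a : List Int) : ∀ (o : List Int) (temp c : Int),
    innerA o a temp c =
      ((a.takeWhile (fun x => decide (temp < x))).reverse ++ o,
       a.dropWhile (fun x => decide (temp < x)),
       c + 2 * ((a.takeWhile (fun x => decide (temp < x))).length : Int)) := by
  induction a with
  | nil => intro o temp c; simp [innerA]
  | cons x rest ih =>
    intro o temp c
    simp only [innerA]
    by_cases hx : temp < x
    · rw [if_pos hx, ih]
      simp [hx]
      omega
    · rw [if_neg hx]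
      simp [hx]

lemma finalA_char (a : List Int) : ∀ (o : List Int) (c : Int),
    finalA o a c = (a.reverse ++ o, c + (a.length : Int)) := by
  induction a with
  | nil => intro o c; simp [finalA]
  | cons x rest ih =>
    intro o c
    simp only [finalA]
    rw [ih]
    simp
    omega

lemma dropWhile_le (temp : Int) (a : List Int) (h : a.Pairwise (fun x y => y ≤ x)) :
    ∀ y ∈ a.dropWhile (fun x => decide (temp < x)), y ≤ temp := by
  induction a with
  | nil => simp
  | cons x rest ih =>
    rcases List.pairwise_cons.1 h with ⟨hx, hrest⟩
    by_cases hcond : temp < x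
    · simpa [List.dropWhile_cons, hcond] using ih hrest
    · simp only [List.dropWhile_cons, hcond, decide_false]
      intro y hy
      rcases List.mem_cons.1 hy with rfl | hy'
      · exact not_lt.1 hcond
      · exact le_trans (hx y hy') (not_lt.1 hcond)

lemma takeWhile_gt (temp : Int) (a : List Int) :
    ∀ x ∈ a.takeWhile (fun x => decide (temp < x)), temp < x := by
  intro x hx
  simpa using List.mem_takeWhile_imp hx

-- the main invariant: from any state (o, a) with a sorted descending and
-- fuel > |o| + TN o a, the outer loop drains o, producing a sorted-descending
-- permutation of o ++ a and adding exactly 2|o| + 4·TN o a to the counter.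
lemma outerA_char : ∀ (fuel : Nat) (o a : List Int) (c : Int),
    a.Pairwise (fun x y => y ≤ x) →
    o.length + TN o a < fuel →
    ∃ a', a'.Pairwise (fun x y => y ≤ x) ∧ (o ++ a).Perm a' ∧
      outerA fuel o a c = ([], a', c + 2 * (o.length : Int) + 4 * (TN o a : Int)) := by
  intro fuel
  induction fuel with
  | zero => intro o a c _ h; omega
  | succ fuel ih =>
    intro o a c hsorted hfuel
    match o with
    | [] =>
      refine ⟨a, hsorted, by simp, ?_⟩
      simp [outerA, TN, invN, crossN]
    | temp :: o1 =>
      simp only [outerA, innerA_char]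
      set p : Int → Bool := fun x => decide (temp < x) with hp
      set tw := a.takeWhile p with htw
      set dw := a.dropWhile p with hdw
      have hsplit : tw ++ dw = a := List.takeWhile_append_dropWhile
      have htwgt : ∀ x ∈ tw, temp < x := takeWhile_gt temp a
      have hdwle : ∀ y ∈ dw, y ≤ temp := dropWhile_le temp a hsorted
      have hdwsorted : dw.Pairwise (fun x y => y ≤ x) :=
        hsorted.sublist (List.dropWhile_sublist _)
      have htwsorted : tw.Pairwise (fun x y => y ≤ x) :=
        hsorted.sublist (List.takeWhile_sublist _)
      have ha2sorted : (temp :: dw).Pairwise (fun x y => y ≤ x) :=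
        List.pairwise_cons.2 ⟨hdwle, hdwsorted⟩
      -- count bookkeeping: TN (tw.reverse ++ o1) (temp :: dw) + tw.length = TN (temp :: o1) a
      have hTN : TN (tw.reverse ++ o1) (temp :: dw) + tw.length = TN (temp :: o1) a := by
        have e1 : invN (tw.reverse ++ o1) = invN o1 + crossLt tw o1 := by
          rw [invN_append, crossLt_reverse]
          have : invN tw.reverse = 0 := by
            apply invN_of_pairwise_le
            rw [List.pairwise_reverse]
            exact htwsorted.imp (fun h => h)
          omega
        have e2 : crossN (tw.reverse ++ o1) (temp :: dw)
            = o1.countP (fun x => decide (x < temp)) + crossN o1 dw := by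
          rw [crossN_append_left]
          have hz : crossN tw.reverse (temp :: dw) = 0 := by
            apply crossN_eq_zero
            intro x hx y hy
            have hxgt : temp < x := htwgt x (by simpa using hx)
            rcases List.mem_cons.1 hy with rfl | hy'
            · omega
            · have := hdwle y hy'; omega
          rw [hz, crossN_cons_right]
          omega
        have e3 : crossN (temp :: o1) a
            = tw.length + crossN o1 tw + crossN o1 dw := by
          have hcnt : a.countP p = tw.length := by
            rw [← hsplit, List.countP_append]
            have h1 : tw.countP p = tw.length :=
              List.countP_eq_length.2 (fun x hx => by simp [hp]; exact htwgt x hx)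
            have h2 : dw.countP p = 0 :=
              List.countP_eq_zero.2 (fun y hy => by simp [hp]; exact hdwle y hy)
            omega
          have : crossN (temp :: o1) a = a.countP p + crossN o1 a := by
            simp [crossN, hp]
          rw [this, hcnt, ← hsplit, crossN_append_right]
          omega
        have e4 : invN (temp :: o1)
            = o1.countP (fun x => decide (x < temp)) + invN o1 := by
          simp [invN]
        have e5 : crossLt tw o1 = crossN o1 tw := crossN_swap tw o1
        simp only [TN, e1, e2, e3, e4, e5]
        omega
      have hlen : (tw.reverse ++ o1).length + tw.length = tw.length + o1.length + tw.length := by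
        simp
      have hfuel' : (tw.reverse ++ o1).length + TN (tw.reverse ++ o1) (temp :: dw) < fuel := by
        have : (temp :: o1).length + TN (temp :: o1) a < fuel + 1 := hfuel
        simp only [List.length_cons] at this
        simp only [List.length_append, List.length_reverse]
        omega
      obtain ⟨a', ha'sorted, ha'perm, heq⟩ :=
        ih (tw.reverse ++ o1) (temp :: dw) (c + 1 + 2 * (tw.length : Int) + 1) ha2sorted hfuel'
      refine ⟨a', ha'sorted, ?_, ?_⟩
      · -- (temp :: o1 ++ a) ~ (tw.reverse ++ o1 ++ temp :: dw) ~ a'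
        refine List.Perm.trans ?_ ha'perm
        rw [List.perm_iff_count]
        intro b
        rw [← hsplit]
        simp [List.count_append, List.count_cons, List.count_reverse]
        omega
      · rw [heq]
        simp only [Prod.mk.injEq, List.length_append, List.length_reverse, List.length_cons]
        refine ⟨trivial, trivial, ?_⟩
        push_cast
        omega

lemma foldl_count (x : Int) (rest : List Int) : ∀ (asc : Int),
    rest.foldl (fun s y => if x < y then s + 1 else s) asc
      = asc + (rest.countP (fun y => decide (x < y)) : Int) := by
  induction rest with
  | nil => intro asc; simp
  | cons y ys ih =>
    intro asc
    simp only [List.foldl_cons, List.countP_cons]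
    by_cases h : x < y
    · rw [if_pos h, ih]; simp [h]; push_cast; ring
    · rw [if_neg h, ih]; simp [h]

lemma ascLoopB_eq (l : List Int) : ∀ (c : Int), ascLoopB l c = c + (ascN l : Int) := by
  induction l with
  | nil => intro c; simp [ascLoopB, ascN]
  | cons x xs ih =>
    intro c
    simp only [ascLoopB, ascN]
    rw [foldl_count, ih]
    push_cast
    ring

-- ===== VERDICT (by name: the statement is the Claim_ definition above) =====
theorem trier_pile_spec : Claim_equal_trier_pile := by
  intro pile _
  unfold Spec_trier_pile trier_pile trier_pile_alt
  set n := pile.length with hn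
  have hfuel : pile.reverse.length + TN pile.reverse [] < (n + 1) * (n + 1) := by
    have h1 : TN pile.reverse [] = invN pile.reverse := by
      simp [TN, crossN_nil_right]
    have h2 := invN_le_sq pile.reverse
    simp only [List.length_reverse] at h2 ⊢
    rw [h1]
    nlinarith
  obtain ⟨a', ha'sorted, ha'perm, heq⟩ :=
    outerA_char ((n + 1) * (n + 1)) pile.reverse [] 0 (by simp) hfuel
  simp only [heq, finalA_char]
  have hTN : TN pile.reverse [] = ascN pile := by
    simp [TN, crossN_nil_right, invN_reverse_eq_ascN]
  have hperm : pile.Perm a' := by simpa using ha'perm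
  -- a' is the descending sort of pile
  have hsortedeq : a' = PySem.List.sorted pile (fun x => x) true := by
    have hs := PySem.List.sorted_pairwise_rev (xs := pile) (key := fun x : Int => x)
    have hsperm : (PySem.List.sorted pile (fun x : Int => x) true).Perm pile :=
      PySem.List.sorted_perm _ _ _
    have hperm2 : a'.Perm (PySem.List.sorted pile (fun x : Int => x) true) :=
      (hperm.symm).trans hsperm.symm
    letI : Std.Antisymm (fun x y : Int => y ≤ x) := ⟨fun a b h1 h2 => le_antisymm h2 h1⟩
    exact List.Perm.eq_of_pairwise' ha'sorted hs hperm2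
  have hlen : a'.length = n := by rw [← hperm.length_eq]
  have hslen : (PySem.List.sorted pile (fun x : Int => x) true).length = n := by
    rw [← hsortedeq]; exact hlen
  rw [hsortedeq]
  have hTN' : TN pile.reverse [] = ascN pile := hTN
  simp only [Prod.mk.injEq]
  constructor
  · simp
  · rw [ascLoopB_eq, hTN']
    simp only [List.length_reverse, hslen, ← hn]
    push_cast
    omega
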